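-- pv_equiv track=rewrite | github.com/Karim-Ib/News-Notifications | News_notification/oil_sentinel/oil_sentinel/notifications/telegram.py | _pack_messages
-- ===== SOURCE A (Python) =====
-- TELEGRAM_MAX_LEN = 4096
--
-- SEP = "\u2500" * 24
--
-- def _pack_messages(header: str, entries: list[str], continuation_header: str) -> list[str]:
--     """
--     Greedily pack formatted entries into <=TELEGRAM_MAX_LEN messages.
--     Splits at entry boundaries so no entry is ever truncated.
--     Returns a list of ready-to-send message strings.
--     """
--     messages = []
--     current_header = header
--     current_entries: list[str] = []
--
--     def _build(h: str, es: list[str]) -> str: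
--         return h + "\n" + SEP + "\n\n" + ("\n\n" + SEP + "\n\n").join(es)
--
--     for entry in entries:
--         candidate = _build(current_header, current_entries + [entry])
--         if len(candidate) <= TELEGRAM_MAX_LEN:
--             current_entries.append(entry)
--         else:
--             if current_entries:
--                 messages.append(_build(current_header, current_entries))
--             current_header = continuation_header
--             current_entries = [entry]
--
--     if current_entries:
--         messages.append(_build(current_header, current_entries))
--
--     return messages
-- ===== SOURCE B (Python) =====
-- TELEGRAM_MAX_LEN = 4096
--
-- SEP = "\u2500" * 24
--
-- _JOIN = "\n\n" + SEP + "\n\n"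
--
--
-- def _pack_messages(header: str, entries: list[str], continuation_header: str) -> list[str]:
--     """Prefix sums + binary search: each message's break index is found by
--     bisecting the prefix-sum array, and the message is built once by slicing."""
--     if not entries:
--         return []
--     n = len(entries)
--     # S[k] = sum over the first k entries of (len(entry) + len(_JOIN)); len(_JOIN) == 28
--     S = [0] * (n + 1)
--     t = 0
--     for k, e in enumerate(entries):
--         t += len(e) + 28
--         S[k + 1] = t
--
--     def _seg_end(i: int, hlen: int) -> int:
--         # largest j in (i, n] with S[j] - S[i] <= 4097 - hlen; at least i + 1
--         limit = S[i] + 4097 - hlen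
--         if S[i + 1] > limit:
--             return i + 1          # an oversized entry still occupies a message alone
--         lo, hi = i + 1, n
--         while lo < hi:
--             mid = (lo + hi + 1) // 2
--             if S[mid] <= limit:
--                 lo = mid
--             else:
--                 hi = mid - 1
--         return lo
--
--     h = header if S[1] <= 4097 - len(header) else continuation_header
--     out: list[str] = []
--     i = 0
--     while i < n:
--         j = _seg_end(i, len(h))
--         out.append(h + "\n" + SEP + "\n\n" + _JOIN.join(entries[i:j]))
--         h = continuation_header
--         i = j
--     return out
-- ===== Notes on version B (the rewrite author's own statement) =====
-- stated objective: alternative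
-- what changed: B precomputes a prefix-sum array of entry lengths once, locates each message's break index by binary search on it, and builds every message a single time by slicing and joining, instead of A's per-entry rebuild-and-measure of the whole candidate message.
import Mathlib
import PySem

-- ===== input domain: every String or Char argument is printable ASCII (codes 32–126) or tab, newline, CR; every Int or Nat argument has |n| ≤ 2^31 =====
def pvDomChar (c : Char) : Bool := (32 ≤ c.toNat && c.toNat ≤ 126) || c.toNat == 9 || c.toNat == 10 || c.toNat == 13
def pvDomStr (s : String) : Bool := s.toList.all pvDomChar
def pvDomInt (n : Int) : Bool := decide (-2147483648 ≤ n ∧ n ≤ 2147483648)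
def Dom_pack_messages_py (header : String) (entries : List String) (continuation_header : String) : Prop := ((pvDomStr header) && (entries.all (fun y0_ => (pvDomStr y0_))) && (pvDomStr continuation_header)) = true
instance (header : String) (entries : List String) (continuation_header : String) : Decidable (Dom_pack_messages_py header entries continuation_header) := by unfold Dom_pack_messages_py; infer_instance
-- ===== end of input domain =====

-- B packs the same greedy messages by a different algorithm: one prefix-sum pass plus a binary
-- search per message for its break index, building each message string only once.

-- ===== PORT A =====
-- SEP = "\u2500" * 24  (strings are ported as List Char at the boundary, PySem style)
def pvSEP : List Char := List.replicate 24 '─'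
-- the join separator "\n\n" + SEP + "\n\n"
def pvJoiner : List Char := '\n' :: '\n' :: (pvSEP ++ ['\n', '\n'])
-- A's helper: _build(h, es) = h + "\n" + SEP + "\n\n" + ("\n\n"+SEP+"\n\n").join(es)
def pvBuild (h : List Char) (es : List (List Char)) : List Char :=
  h ++ '\n' :: (pvSEP ++ '\n' :: '\n' :: PySem.Chars.join pvJoiner es)

def pack_messages_py (header : String) (entries : List String) (continuation_header : String) : List String :=
  -- state: (messages, current_header, current_entries)
  let st := (entries.map String.toList).foldl
    (fun (st : List (List Char) × List Char × List (List Char)) entry =>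
      let msgs := st.1; let curH := st.2.1; let cur := st.2.2
      let candidate := pvBuild curH (cur ++ [entry])
      if candidate.length ≤ 4096 then
        (msgs, curH, cur ++ [entry])
      else
        ((if cur ≠ [] then msgs ++ [pvBuild curH cur] else msgs),
         continuation_header.toList, [entry]))
    ([], header.toList, [])
  (if st.2.2 ≠ [] then st.1 ++ [pvBuild st.2.1 st.2.2] else st.1).map (fun cs => String.ofList cs)

-- ===== PORT B =====
-- Source B's prefix-sum pass: S = [0]*(n+1); t = 0; for k,e in enumerate(entries): t += len(e)+28; S[k+1] = t
-- (ported as building the same list [S[1], …, S[n]] front to back; S itself is 0 :: this)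
def pvScan (t : Nat) : List (List Char) → List Nat
  | [] => []
  | e :: r => (t + e.length + 28) :: pvScan (t + e.length + 28) r

-- Source B's hand-written binary search: largest j in [lo, hi] with S[j] <= limit (given S[lo] <= limit);
-- the fuel argument (any value ≥ hi - lo) only makes the while loop structurally terminating,
-- and mid = (lo + hi + 1) / 2 is written inline
def pvBisect (S : List Nat) (limit : Int) : Nat → Nat → Nat → Nat
  | 0, lo, _ => lo
  | fuel+1, lo, hi =>
    if lo < hi then
      if (S.getD ((lo + hi + 1) / 2) 0 : Int) ≤ limit then
        pvBisect S limit fuel ((lo + hi + 1) / 2) hi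
      else pvBisect S limit fuel lo ((lo + hi + 1) / 2 - 1)
    else lo

-- Source B's _seg_end(i, hlen)
def pvSegEnd (S : List Nat) (n i hlen : Nat) : Nat :=
  -- limit = S[i] + 4097 - hlen
  if ¬ ((S.getD (i+1) 0 : Int) ≤ (S.getD i 0 : Int) + 4097 - hlen) then i + 1   -- an oversized entry still occupies a message alone
  else pvBisect S ((S.getD i 0 : Int) + 4097 - hlen) (n - (i+1)) (i+1) n

-- Source B's while loop: each message is entries[i:j] sliced and joined once
-- (entries[i:j] with 0 ≤ i ≤ j is exactly (es.drop i).take (j - i);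
-- the fuel argument, any value ≥ n - i, only makes the loop structurally terminating)
def pvPackLoop (es : List (List Char)) (S : List Nat) (n : Nat) (cont : List Char) :
    Nat → Nat → List Char → List (List Char)
  | 0, _, _ => []
  | fuel+1, i, h =>
    if i < n then
      pvBuild h ((es.drop i).take (pvSegEnd S n i h.length - i))
        :: pvPackLoop es S n cont fuel (pvSegEnd S n i h.length) cont
    else []

def pack_messages_py_alt (header : String) (entries : List String) (continuation_header : String) : List String :=
  let es := entries.map String.toList
  if es.isEmpty then [] else
  let n := es.length
  let S := 0 :: pvScan 0 es
  -- h = header if S[1] <= 4097 - len(header) else continuation_header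
  let h0 := if (S.getD 1 0 : Int) ≤ 4097 - (header.toList.length : Int)
            then header.toList else continuation_header.toList
  (pvPackLoop es S n continuation_header.toList n 0 h0).map (fun cs => String.ofList cs)

-- ===== PRECONDITION & SPEC =====
def Spec_pack_messages_py (header : String) (entries : List String) (continuation_header : String) (out : List String) : Prop := out = pack_messages_py_alt header entries continuation_header
instance (header : String) (entries : List String) (continuation_header : String) (out : List String) : Decidable (Spec_pack_messages_py header entries continuation_header out) := by unfold Spec_pack_messages_py; infer_instance

-- ===== CLAIM (what is proved, stated in full; the proofs are below) =====
def Claim_equal_pack_messages_py : Prop := ∀ (header : String) (entries : List String) (continuation_header : String), Dom_pack_messages_py header entries continuation_header → Spec_pack_messages_py header entries continuation_header (pack_messages_py header entries continuation_header)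

-- ===== LEMMAS AND PROOFS =====

-- the common greedy segmentation, as a recursion on the remaining entries (proof-side referee)
def pvSeg (cont : List Char) : List Char → List (List Char) → List (List Char) → List (List Char)
  | h, cur, [] => [pvBuild h cur]
  | h, cur, e :: t =>
    if (pvBuild h (cur ++ [e])).length ≤ 4096 then pvSeg cont h (cur ++ [e]) t
    else pvBuild h cur :: pvSeg cont cont [e] t

theorem pvJoiner_length : pvJoiner.length = 28 := by
  simp [pvJoiner, pvSEP]

theorem pvJoin_append_singleton_length (es : List (List Char)) (e : List Char) :
    (PySem.Chars.join pvJoiner (es ++ [e])).length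
      = (PySem.Chars.join pvJoiner es).length + (if es ≠ [] then 28 else 0) + e.length := by
  induction es with
  | nil => simp [PySem.Chars.join_nil, PySem.Chars.join_singleton]
  | cons a t ih =>
    cases t with
    | nil =>
      simp [PySem.Chars.join_singleton, PySem.Chars.join_cons_cons, pvJoiner_length]
      omega
    | cons b u =>
      rw [show (a :: b :: u) ++ [e] = a :: ((b :: u) ++ [e]) from rfl,
          show (b :: u) ++ [e] = b :: (u ++ [e]) from rfl,
          PySem.Chars.join_cons_cons, PySem.Chars.join_cons_cons]
      rw [show (b :: u) ++ [e] = b :: (u ++ [e]) from rfl] at ih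
      simp only [ne_eq, not_false_eq_true, if_true, List.cons_ne_nil] at ih ⊢
      simp only [List.length_append, pvJoiner_length, ih]
      omega

theorem pvBuild_length (h : List Char) (es : List (List Char)) :
    (pvBuild h es).length = h.length + 27 + (PySem.Chars.join pvJoiner es).length := by
  simp [pvBuild, pvSEP]; omega

-- A's fold equals pvSeg once the current message is nonempty
theorem pvA_loop (cont : List Char) (es : List (List Char))
    (msgs : List (List Char)) (h : List Char) (cur : List (List Char)) (hc : cur ≠ []) :
    (if (es.foldl
      (fun (st : List (List Char) × List Char × List (List Char)) entry =>
        let msgs := st.1; let curH := st.2.1; let cur := st.2.2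
        let candidate := pvBuild curH (cur ++ [entry])
        if candidate.length ≤ 4096 then
          (msgs, curH, cur ++ [entry])
        else
          ((if cur ≠ [] then msgs ++ [pvBuild curH cur] else msgs),
           cont, [entry]))
      (msgs, h, cur)).2.2 ≠ [] then
      (es.foldl
      (fun (st : List (List Char) × List Char × List (List Char)) entry =>
        let msgs := st.1; let curH := st.2.1; let cur := st.2.2
        let candidate := pvBuild curH (cur ++ [entry])
        if candidate.length ≤ 4096 then
          (msgs, curH, cur ++ [entry])
        else
          ((if cur ≠ [] then msgs ++ [pvBuild curH cur] else msgs),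
           cont, [entry]))
      (msgs, h, cur)).1 ++ [pvBuild (es.foldl
      (fun (st : List (List Char) × List Char × List (List Char)) entry =>
        let msgs := st.1; let curH := st.2.1; let cur := st.2.2
        let candidate := pvBuild curH (cur ++ [entry])
        if candidate.length ≤ 4096 then
          (msgs, curH, cur ++ [entry])
        else
          ((if cur ≠ [] then msgs ++ [pvBuild curH cur] else msgs),
           cont, [entry]))
      (msgs, h, cur)).2.1 (es.foldl
      (fun (st : List (List Char) × List Char × List (List Char)) entry =>
        let msgs := st.1; let curH := st.2.1; let cur := st.2.2
        let candidate := pvBuild curH (cur ++ [entry])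
        if candidate.length ≤ 4096 then
          (msgs, curH, cur ++ [entry])
        else
          ((if cur ≠ [] then msgs ++ [pvBuild curH cur] else msgs),
           cont, [entry]))
      (msgs, h, cur)).2.2]
    else (es.foldl
      (fun (st : List (List Char) × List Char × List (List Char)) entry =>
        let msgs := st.1; let curH := st.2.1; let cur := st.2.2
        let candidate := pvBuild curH (cur ++ [entry])
        if candidate.length ≤ 4096 then
          (msgs, curH, cur ++ [entry])
        else
          ((if cur ≠ [] then msgs ++ [pvBuild curH cur] else msgs),
           cont, [entry]))
      (msgs, h, cur)).1)
    = msgs ++ pvSeg cont h cur es := by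
  induction es generalizing msgs h cur with
  | nil => simp [pvSeg, hc]
  | cons e t ih =>
    simp only [List.foldl_cons, pvSeg]
    by_cases hle : (pvBuild h (cur ++ [e])).length ≤ 4096
    · simpa [hle] using ih msgs h (cur ++ [e]) (by simp)
    · have := ih (msgs ++ [pvBuild h cur]) cont [e] (by simp)
      simpa [hle, hc] using this

-- prefix sums: sumS es k = S[k]
def pvSum (es : List (List Char)) (k : Nat) : Nat :=
  ((es.take k).map (fun e => e.length + 28)).sum

theorem pvScan_getD (es : List (List Char)) (t k : Nat) (hk : k < es.length) :
    (pvScan t es).getD k 0 = t + pvSum es (k+1) := by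
  induction es generalizing t k with
  | nil => simp at hk
  | cons e r ih =>
    cases k with
    | zero => simp [pvScan, pvSum]; omega
    | succ k =>
      have := ih (t + e.length + 28) k (by simpa using hk)
      simp only [pvScan, List.getD_cons_succ, this, pvSum, List.take_succ_cons, List.map_cons,
        List.sum_cons]
      omega

theorem pvS_getD (es : List (List Char)) (k : Nat) (hk : k ≤ es.length) :
    ((0 :: pvScan 0 es).getD k 0) = pvSum es k := by
  cases k with
  | zero => simp [pvSum]
  | succ k =>
    have := pvScan_getD es 0 k (by omega)
    simpa using this

theorem pvSum_cons (e : List Char) (r : List (List Char)) (k : Nat) :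
    pvSum (e :: r) (k+1) = e.length + 28 + pvSum r k := by
  simp [pvSum]
  try omega

theorem pvSum_succ (es : List (List Char)) (k : Nat) (hk : k < es.length) :
    pvSum es (k+1) = pvSum es k + ((es.getD k []).length + 28) := by
  induction es generalizing k with
  | nil => simp at hk
  | cons e r ih =>
    cases k with
    | zero => simp [pvSum]
    | succ k =>
      rw [pvSum_cons, pvSum_cons, ih k (by simpa using hk), List.getD_cons_succ]
      omega

theorem pvSum_mono (es : List (List Char)) {a b : Nat} (hab : a ≤ b) :
    pvSum es a ≤ pvSum es b := by
  unfold pvSum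
  refine List.Sublist.sum_le_sum (List.Sublist.map _ ?_) (by intro x hx; positivity)
  exact List.take_sublist_take_left hab

-- slice extension: entries[i:j+1] = entries[i:j] ++ [entries[j]]
theorem pvSlice_succ (es : List (List Char)) (i j : Nat) (hij : i ≤ j) (hj : j < es.length) :
    (es.drop i).take (j + 1 - i) = (es.drop i).take (j - i) ++ [es.getD j []] := by
  have h1 : j + 1 - i = (j - i) + 1 := by omega
  rw [h1, List.take_add_one]
  have h2 : (es.drop i)[j - i]? = es[j]? := by
    rw [List.getElem?_drop]; congr 1; omega
  rw [h2, List.getElem?_eq_getElem hj, List.getD_eq_getElem _ _ hj]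
  rfl

-- entries[i:i+1] = [entries[i]]
theorem pvSlice_one (es : List (List Char)) (i : Nat) (hi : i < es.length) :
    (es.drop i).take 1 = [es.getD i []] := by
  rw [List.drop_eq_getElem_cons hi, List.take_succ_cons, List.take_zero,
    List.getD_eq_getElem _ _ hi]

-- length of a joined slice, in prefix sums
theorem pvJoin_slice_length (es : List (List Char)) (i j : Nat) (hij : i < j) (hj : j ≤ es.length) :
    (PySem.Chars.join pvJoiner ((es.drop i).take (j - i))).length + 28
      = pvSum es j - pvSum es i := by
  induction j with
  | zero => omega
  | succ j ih =>
    rcases Nat.lt_or_ge i j with hij' | hij'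
    · have hj' : j < es.length := by omega
      rw [show j + 1 - i = (j - i) + 1 by omega] at *
      rw [show (j:Nat) - i + 1 = j + 1 - i by omega, pvSlice_succ es i j (by omega) hj',
        pvJoin_append_singleton_length]
      have hne : (es.drop i).take (j - i) ≠ [] := by
        have : ((es.drop i).take (j - i)).length = j - i := by
          rw [List.length_take, List.length_drop]; omega
        intro h; rw [h] at this; simp at this; omega
      have := ih hij' (by omega)
      have hs := pvSum_succ es j hj'
      have hm : pvSum es i + 28 ≤ pvSum es j := by
        have h1 := pvSum_succ es i (by omega)
        have h2 := pvSum_mono es (show i + 1 ≤ j by omega)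
        omega
      simp only [ne_eq, hne, not_false_eq_true, if_true]
      omega
    · have hji : j = i := by omega
      subst hji
      rw [show j + 1 - j = 1 by omega, pvSlice_one es j (by omega),
        PySem.Chars.join_singleton]
      have hs := pvSum_succ es j (by omega)
      omega


-- the fit predicate in prefix sums:   pvBuild h (entries[i:j]) fits  ↔  S[j] ≤ S[i] + 4097 - |h|
theorem pvFit_iff (es : List (List Char)) (h : List Char) (i j : Nat) (hij : i < j) (hj : j ≤ es.length) :
    ((pvBuild h ((es.drop i).take (j - i))).length ≤ 4096)
      ↔ ((pvSum es j : Int) ≤ (pvSum es i : Int) + 4097 - h.length) := by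
  have h1 := pvJoin_slice_length es i j hij hj
  have hm : pvSum es i + 28 ≤ pvSum es j := by
    have h2 := pvSum_succ es i (by omega)
    have h3 := pvSum_mono es (show i + 1 ≤ j from hij)
    omega
  rw [pvBuild_length]
  omega

theorem pvBisect_ge (S : List Nat) (limit : Int) :
    ∀ (fuel lo hi : Nat), lo ≤ pvBisect S limit fuel lo hi := by
  intro fuel
  induction fuel with
  | zero => intro lo hi; simp [pvBisect]
  | succ fuel ih =>
    intro lo hi
    simp only [pvBisect]
    split
    · split
      · exact le_trans (by omega) (ih ((lo + hi + 1) / 2) hi)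
      · exact ih lo ((lo + hi + 1) / 2 - 1)
    · omega

theorem pvBisect_spec (S : List Nat) (limit : Int) :
    ∀ (fuel lo hi : Nat), hi - lo ≤ fuel → lo ≤ hi →
    (∀ a b, a ≤ b → b ≤ hi → (S.getD a 0 : Int) ≤ (S.getD b 0 : Int)) →
    (S.getD lo 0 : Int) ≤ limit →
    pvBisect S limit fuel lo hi ≤ hi ∧ ((S.getD (pvBisect S limit fuel lo hi) 0 : Int) ≤ limit)
      ∧ ∀ j, lo ≤ j → j ≤ hi → (S.getD j 0 : Int) ≤ limit → j ≤ pvBisect S limit fuel lo hi := by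
  intro fuel
  induction fuel with
  | zero =>
    intro lo hi hf hlh hmono hlo
    simp only [pvBisect]
    exact ⟨hlh, hlo, fun j _ hj _ => by omega⟩
  | succ fuel ih =>
    intro lo hi hf hlh hmono hlo
    by_cases hlt : lo < hi
    · simp only [pvBisect, if_pos hlt]
      have hmb : lo < (lo + hi + 1) / 2 ∧ (lo + hi + 1) / 2 ≤ hi := by omega
      by_cases hc : (S.getD ((lo + hi + 1) / 2) 0 : Int) ≤ limit
      · rw [if_pos hc]
        obtain ⟨h1, h2, h3⟩ := ih ((lo + hi + 1) / 2) hi (by omega) (by omega) hmono hc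
        refine ⟨h1, h2, fun j hj1 hj2 hj3 => ?_⟩
        rcases Nat.lt_or_ge j ((lo + hi + 1) / 2) with hcj | hcj
        · have := pvBisect_ge S limit fuel ((lo + hi + 1) / 2) hi
          omega
        · exact h3 j hcj hj2 hj3
      · rw [if_neg hc]
        obtain ⟨h1, h2, h3⟩ := ih lo ((lo + hi + 1) / 2 - 1) (by omega) (by omega)
          (fun a b hab hb => hmono a b hab (by omega)) hlo
        refine ⟨by omega, h2, fun j hj1 hj2 hj3 => ?_⟩
        rcases Nat.lt_or_ge j ((lo + hi + 1) / 2) with hcj | hcj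
        · exact h3 j hj1 (by omega) hj3
        · exact absurd hj3 (by have := hmono ((lo + hi + 1) / 2) j hcj hj2; omega)
    · simp only [pvBisect, if_neg hlt]
      exact ⟨by omega, hlo, fun j _ hj _ => by omega⟩

-- specification of Source B's _seg_end
theorem pvSegEnd_spec (es : List (List Char)) (i : Nat) (h : List Char) (hin : i < es.length)
    (j : Nat) (hj : j = pvSegEnd (0 :: pvScan 0 es) es.length i h.length) :
    i + 1 ≤ j ∧ j ≤ es.length
      ∧ (¬ (pvBuild h ((es.drop i).take 1)).length ≤ 4096 → j = i + 1)
      ∧ ((pvBuild h ((es.drop i).take 1)).length ≤ 4096 →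
          (pvBuild h ((es.drop i).take (j - i))).length ≤ 4096
          ∧ ∀ m, i < m → m ≤ es.length →
              (pvBuild h ((es.drop i).take (m - i))).length ≤ 4096 → m ≤ j) := by
  have hS : ∀ k, k ≤ es.length → ((0 :: pvScan 0 es).getD k 0) = pvSum es k :=
    fun k hk => pvS_getD es k hk
  have hfit1 : ((pvBuild h ((es.drop i).take 1)).length ≤ 4096)
      ↔ ((pvSum es (i+1) : Int) ≤ (pvSum es i : Int) + 4097 - h.length) := by
    have := pvFit_iff es h i (i+1) (by omega) (by omega)
    rwa [show i + 1 - i = 1 by omega] at this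
  unfold pvSegEnd at hj
  rw [hS i (by omega), hS (i+1) (by omega)] at hj
  split at hj
  · -- S[i+1] > limit: forced single-entry segment
    rename_i hcond
    refine ⟨by omega, by omega, fun _ => hj, fun hf => absurd ((hfit1).mp hf) hcond⟩
  · -- binary search branch
    rename_i hcond
    rw [not_not] at hcond
    have hmono : ∀ a b, a ≤ b → b ≤ es.length →
        (((0 :: pvScan 0 es).getD a 0 : Int) ≤ ((0 :: pvScan 0 es).getD b 0 : Int)) := by
      intro a b hab hb
      rw [hS a (by omega), hS b hb]
      exact_mod_cast pvSum_mono es hab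
    obtain ⟨h1, h2, h3⟩ := pvBisect_spec (0 :: pvScan 0 es)
      ((pvSum es i : Int) + 4097 - h.length) (es.length - (i+1)) (i+1) es.length (by omega)
      (by omega) hmono (by rw [hS (i+1) (by omega)]; exact hcond)
    have hge := pvBisect_ge (0 :: pvScan 0 es) ((pvSum es i : Int) + 4097 - h.length)
      (es.length - (i+1)) (i+1) es.length
    rw [← hj] at h1 h2 h3 hge
    refine ⟨hge, h1, fun hnf => absurd (hfit1.mpr hcond) hnf, fun _ => ⟨?_, ?_⟩⟩
    · rw [hS j h1] at h2
      exact (pvFit_iff es h i j (by omega) h1).mpr h2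
    · intro m him hm hfm
      have := (pvFit_iff es h i m him hm).mp hfm
      exact h3 m (by omega) hm (by rw [hS m hm]; exact this)

-- greedy segment: pvSeg from a partial message entries[i:m] ends the message exactly at _seg_end
theorem pvSeg_segment (es : List (List Char)) (cont h : List Char) (i : Nat) (hin : i < es.length) :
    ∀ (d m : Nat), es.length - m ≤ d → i < m → m ≤ es.length →
    ((pvBuild h ((es.drop i).take (m - i))).length ≤ 4096 ∨ m = i + 1) →
    m ≤ pvSegEnd (0 :: pvScan 0 es) es.length i h.length →
    pvSeg cont h ((es.drop i).take (m - i)) (es.drop m)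
      = pvBuild h ((es.drop i).take (pvSegEnd (0 :: pvScan 0 es) es.length i h.length - i))
        :: (if pvSegEnd (0 :: pvScan 0 es) es.length i h.length < es.length then
              pvSeg cont cont [es.getD (pvSegEnd (0 :: pvScan 0 es) es.length i h.length) []]
                (es.drop (pvSegEnd (0 :: pvScan 0 es) es.length i h.length + 1))
            else []) := by
  obtain ⟨hj1, hj2, hj3, hj4⟩ := pvSegEnd_spec es i h hin _ rfl
  set j := pvSegEnd (0 :: pvScan 0 es) es.length i h.length with hjdef
  -- a longer fitting prefix implies the one-entry prefix fits
  have hdown : ∀ m, i < m → m ≤ es.length →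
      (pvBuild h ((es.drop i).take (m - i))).length ≤ 4096 →
      (pvBuild h ((es.drop i).take 1)).length ≤ 4096 := by
    intro m h1 h2 hf
    have hb := pvFit_iff es h i (i+1) (by omega) (by omega)
    rw [show i + 1 - i = 1 by omega] at hb
    rw [hb]
    rw [pvFit_iff es h i m h1 h2] at hf
    have := pvSum_mono es (show i + 1 ≤ m by omega)
    omega
  intro d
  induction d with
  | zero =>
    intro m hd him hm hfit hmj
    have hmn : m = es.length := by omega
    have hjn : j = es.length := by omega
    subst hmn
    rw [List.drop_length, hjn]
    simp [pvSeg]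
  | succ d ih =>
    intro m hd him hm hfit hmj
    rcases eq_or_lt_of_le hm with hmn | hmn
    · have hjn : j = es.length := by omega
      subst hmn
      rw [List.drop_length, hjn]
      simp [pvSeg]
    · have hdrop : es.drop m = es.getD m [] :: es.drop (m+1) := by
        rw [List.drop_eq_getElem_cons hmn, List.getD_eq_getElem _ _ hmn]
      rw [hdrop]
      show (if (pvBuild h ((es.drop i).take (m - i) ++ [es.getD m []])).length ≤ 4096 then
              pvSeg cont h ((es.drop i).take (m - i) ++ [es.getD m []]) (es.drop (m+1))
            else pvBuild h ((es.drop i).take (m - i))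
              :: pvSeg cont cont [es.getD m []] (es.drop (m+1))) = _
      rw [← pvSlice_succ es i m (by omega) hmn]
      by_cases hc : (pvBuild h ((es.drop i).take (m + 1 - i))).length ≤ 4096
      · rw [if_pos hc]
        have hm1j : m + 1 ≤ j := by
          have hf1 := hdown (m+1) (by omega) (by omega) hc
          exact (hj4 hf1).2 (m+1) (by omega) (by omega) hc
        exact ih (m+1) (by omega) (by omega) (by omega) (Or.inl hc) hm1j
      · rw [if_neg hc]
        have hjm : j = m := by
          by_cases hf1 : (pvBuild h ((es.drop i).take 1)).length ≤ 4096
          · obtain ⟨hfj, hmax⟩ := hj4 hf1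
            rcases Nat.lt_or_ge m j with hlt | _
            · exfalso
              apply hc
              rw [pvFit_iff es h i (m+1) (by omega) (by omega)]
              rw [pvFit_iff es h i j (by omega) hj2] at hfj
              have := pvSum_mono es (show m + 1 ≤ j by omega)
              omega
            · omega
          · have hji : j = i + 1 := hj3 hf1
            rcases hfit with hfm | hme
            · exact absurd (hdown m him hm hfm) hf1
            · omega
        rw [hjm, if_pos hmn]

-- the main correspondence: pvSeg = Source B's while loop
theorem pvSeg_eq_loop (es : List (List Char)) (cont : List Char) :
    ∀ (fuel i : Nat) (h : List Char), es.length - i ≤ fuel → i < es.length →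
    pvSeg cont h [es.getD i []] (es.drop (i+1))
      = pvPackLoop es (0 :: pvScan 0 es) es.length cont fuel i h := by
  intro fuel
  induction fuel with
  | zero => intro i h hd hin; omega
  | succ fuel ih =>
    intro i h hd hin
    obtain ⟨hj1, hj2, _, _⟩ := pvSegEnd_spec es i h hin _ rfl
    simp only [pvPackLoop, if_pos hin]
    have hone : [es.getD i []] = (es.drop i).take ((i+1) - i) := by
      rw [show i + 1 - i = 1 by omega, pvSlice_one es i hin]
    rw [hone]
    rw [pvSeg_segment es cont h i hin es.length (i+1) (by omega) (by omega) (by omega)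
      (Or.inr rfl) hj1]
    congr 1
    by_cases hjn : pvSegEnd (0 :: pvScan 0 es) es.length i h.length < es.length
    · rw [if_pos hjn]
      exact ih _ cont (by omega) hjn
    · rw [if_neg hjn]
      cases fuel with
      | zero => rfl
      | succ f => simp only [pvPackLoop, if_neg hjn]

-- ===== VERDICT (by name: the statement is the Claim_ definition above) =====
theorem pack_messages_py_spec : Claim_equal_pack_messages_py := by
  intro header entries continuation_header _
  show pack_messages_py header entries continuation_header
      = pack_messages_py_alt header entries continuation_header
  unfold pack_messages_py pack_messages_py_alt
  cases entries with
  | nil => simp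
  | cons s0 st =>
    dsimp only
    simp only [List.map_cons, List.foldl_cons, List.isEmpty_cons, Bool.false_eq_true,
      if_false, List.nil_append]
    -- the two first-header tests agree
    have hcond : ((pvBuild header.toList [s0.toList]).length ≤ 4096)
        ↔ (((0 :: pvScan 0 (s0.toList :: st.map String.toList)).getD 1 0 : Int)
            ≤ 4097 - (header.toList.length : Int)) := by
      have hf := pvFit_iff (s0.toList :: st.map String.toList) header.toList 0 1 (by omega)
        (by simp)
      have ht : (((s0.toList :: st.map String.toList).drop 0).take (1 - 0)) = [s0.toList] := by
        simp
      rw [ht] at hf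
      rw [hf, pvS_getD (s0.toList :: st.map String.toList) 1 (by simp)]
      have h0 : pvSum (s0.toList :: st.map String.toList) 0 = 0 := by simp [pvSum]
      rw [h0]
      constructor <;> (intro; omega)
    -- both sides reduce to the common greedy segmentation
    have hseg : ∀ h0 : List Char,
        pvSeg continuation_header.toList h0 [s0.toList] (st.map String.toList)
          = pvPackLoop (s0.toList :: st.map String.toList)
              (0 :: pvScan 0 (s0.toList :: st.map String.toList))
              (s0.toList :: st.map String.toList).length continuation_header.toList
              (s0.toList :: st.map String.toList).length 0 h0 := by
      intro h0
      have h00 : ([s0.toList] : List (List Char))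
          = [(s0.toList :: st.map String.toList).getD 0 []] := by simp
      have h01 : st.map String.toList = (s0.toList :: st.map String.toList).drop 1 := by simp
      rw [h00, h01]
      exact pvSeg_eq_loop (s0.toList :: st.map String.toList) continuation_header.toList
        (s0.toList :: st.map String.toList).length 0 h0 (by omega) (by simp)
    by_cases h0 : (pvBuild header.toList [s0.toList]).length ≤ 4096
    · rw [if_pos h0, if_pos (hcond.mp h0)]
      rw [pvA_loop continuation_header.toList (st.map String.toList) [] header.toList
        [s0.toList] (by simp)]
      rw [List.nil_append, hseg]
    · rw [if_neg h0, if_neg (fun hx => h0 (hcond.mpr hx))]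
      simp only [ne_eq, not_true_eq_false, if_false]
      rw [pvA_loop continuation_header.toList (st.map String.toList) [] continuation_header.toList
        [s0.toList] (by simp)]
      rw [List.nil_append, hseg]
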